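-- pv_equiv track=rewrite | github.com/kmartinez/icetracker-py | src/main.py | get_next_alarm_hour
-- ===== SOURCE A (Python) =====
-- WAKE_UP_WINDOW_HRS  = [0, 3, 6, 9, 12, 15, 18, 21]
--
-- def get_next_alarm_hour(hh):
--     nexttime = None
--
--     if ( hh in WAKE_UP_WINDOW_HRS):
--             position = WAKE_UP_WINDOW_HRS.index(hh)
--             next_position = position + 1
--             if (next_position > (len(WAKE_UP_WINDOW_HRS)-1)):
--                 next_position = 0
--             nexttime = WAKE_UP_WINDOW_HRS[next_position]
--     else:
--         for i in WAKE_UP_WINDOW_HRS: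
--             if( i > hh):
--                 nexttime = i
--                 break
--         if nexttime == None:
--             nexttime = 0
--     return nexttime
-- ===== SOURCE B (Python) =====
-- WAKE_UP_WINDOW_HRS = [0, 3, 6, 9, 12, 15, 18, 21]
--
-- def get_next_alarm_hour(hh):
--     # binary search for the first window hour strictly greater than hh
--     lo, hi = 0, len(WAKE_UP_WINDOW_HRS)
--     while lo < hi:
--         mid = (lo + hi) // 2
--         if WAKE_UP_WINDOW_HRS[mid] <= hh:
--             lo = mid + 1
--         else:
--             hi = mid
--     return WAKE_UP_WINDOW_HRS[lo] if lo < len(WAKE_UP_WINDOW_HRS) else 0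
-- ===== Notes on version B (the rewrite author's own statement) =====
-- stated objective: idiomatic
-- what changed: Replaces A's two-branch logic (membership test + list.index + modular wrap, else a linear scan with a None sentinel) by a single bisect-right binary search over the sorted constant list, indexing the successor directly.
import Mathlib
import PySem

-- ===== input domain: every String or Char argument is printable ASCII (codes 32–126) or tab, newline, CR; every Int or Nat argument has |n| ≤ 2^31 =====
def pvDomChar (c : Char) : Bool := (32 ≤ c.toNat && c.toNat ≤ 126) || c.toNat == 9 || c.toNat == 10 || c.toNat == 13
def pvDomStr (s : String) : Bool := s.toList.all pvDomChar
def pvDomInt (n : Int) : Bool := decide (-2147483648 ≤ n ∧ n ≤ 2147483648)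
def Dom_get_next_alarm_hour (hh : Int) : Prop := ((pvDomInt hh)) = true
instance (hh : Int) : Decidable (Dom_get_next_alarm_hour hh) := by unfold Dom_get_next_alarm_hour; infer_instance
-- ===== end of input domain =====

-- B replaces A's two branches (membership + index + modular wrap, else linear scan) with one bisect-right binary search over the sorted constant list.

-- ===== PORT A =====
def pvWakeUpWindowHrs : List Int := [0, 3, 6, 9, 12, 15, 18, 21]

-- A's for-loop with break: first element of the list satisfying i > hh (none if the loop falls through)
def pvScanFirstGt (hh : Int) : List Int → Option Int
  | [] => none
  | i :: rest => if i > hh then some i else pvScanFirstGt hh rest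

def get_next_alarm_hour (hh : Int) : Int :=
  if pvWakeUpWindowHrs.contains hh then
    match PySem.List.index? pvWakeUpWindowHrs hh with
    | some position =>
      let next_position := position + 1
      let next_position :=
        if next_position > pvWakeUpWindowHrs.length - 1 then 0 else next_position
      (PySem.List.pyGet? pvWakeUpWindowHrs (Int.ofNat next_position)).getD 0
    | none => 0  -- unreachable: membership was just tested
  else
    match pvScanFirstGt hh pvWakeUpWindowHrs with
    | some i => i
    | none => 0

-- ===== PORT B =====
-- Source B's while-loop (bisect_right): lo/hi binary search, decreasing on hi - lo
def pvBisectGt (hh : Int) (lo hi : Nat) : Nat :=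
  if _h : lo < hi then
    let mid := (lo + hi) / 2
    if (PySem.List.pyGet? pvWakeUpWindowHrs (Int.ofNat mid)).getD 0 ≤ hh then
      pvBisectGt hh (mid + 1) hi
    else
      pvBisectGt hh lo mid
  else lo
termination_by hi - lo
decreasing_by all_goals omega

def get_next_alarm_hour_alt (hh : Int) : Int :=
  let lo := pvBisectGt hh 0 pvWakeUpWindowHrs.length
  if lo < pvWakeUpWindowHrs.length then
    (PySem.List.pyGet? pvWakeUpWindowHrs (Int.ofNat lo)).getD 0
  else 0

-- ===== PRECONDITION & SPEC =====
def Spec_get_next_alarm_hour (hh : Int) (out : Int) : Prop := out = get_next_alarm_hour_alt hh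
instance (hh : Int) (out : Int) : Decidable (Spec_get_next_alarm_hour hh out) := by unfold Spec_get_next_alarm_hour; infer_instance

-- ===== CLAIM (what is proved, stated in full; the proofs are below) =====
def Claim_equal_get_next_alarm_hour : Prop := ∀ (hh : Int), Dom_get_next_alarm_hour hh → Spec_get_next_alarm_hour hh (get_next_alarm_hour hh)

-- ===== LEMMAS AND PROOFS =====

-- the common piecewise value: the next window hour strictly above hh, 0 if none
def pvNextHour (hh : Int) : Int :=
  if hh < 0 then 0 else if hh < 3 then 3 else if hh < 6 then 6 else if hh < 9 then 9
  else if hh < 12 then 12 else if hh < 15 then 15 else if hh < 18 then 18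
  else if hh < 21 then 21 else 0

theorem get_next_alarm_hour_eq_pvNextHour (hh : Int) :
    get_next_alarm_hour hh = pvNextHour hh := by
  by_cases hm : hh ∈ pvWakeUpWindowHrs
  · simp [pvWakeUpWindowHrs] at hm
    rcases hm with rfl|rfl|rfl|rfl|rfl|rfl|rfl|rfl <;> decide
  · have hc : pvWakeUpWindowHrs.contains hh = false := by simpa using hm
    unfold get_next_alarm_hour pvNextHour
    rw [hc]
    simp only [pvScanFirstGt, pvWakeUpWindowHrs, Bool.false_eq_true, if_false]
    split_ifs <;> simp_all

theorem pvBisectGt_eval (hh : Int) : pvBisectGt hh 0 8 =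
    if 12 ≤ hh then (if 18 ≤ hh then (if 21 ≤ hh then 8 else 7) else (if 15 ≤ hh then 6 else 5))
    else (if 6 ≤ hh then (if 9 ≤ hh then 4 else 3)
          else (if 3 ≤ hh then 2 else (if 0 ≤ hh then 1 else 0))) := by
  simp [pvBisectGt, pvWakeUpWindowHrs, PySem.List.pyGet?, PySem.List.pyIdx?]

set_option maxHeartbeats 2000000 in
theorem get_next_alarm_hour_alt_eq_pvNextHour (hh : Int) :
    get_next_alarm_hour_alt hh = pvNextHour hh := by
  unfold get_next_alarm_hour_alt pvNextHour
  simp only [pvWakeUpWindowHrs, List.length_cons, List.length_nil, Nat.reduceAdd, pvBisectGt_eval]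
  split_ifs <;> first | decide | omega

-- ===== VERDICT (by name: the statement is the Claim_ definition above) =====
theorem get_next_alarm_hour_spec : Claim_equal_get_next_alarm_hour := by
  intro hh _
  unfold Spec_get_next_alarm_hour
  rw [get_next_alarm_hour_eq_pvNextHour, get_next_alarm_hour_alt_eq_pvNextHour]
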